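-- pv_equiv track=rewrite | github.com/victorgtz91/middle-east-vc-outreach | generate_personalized_emails.py | pick_fund_column
-- ===== SOURCE A (Python) =====
-- def pick_fund_column(columns: list[str]) -> str | None:
--     """Best-effort detection of the fund/firm name column."""
--     lower = {c: str(c).strip().lower() for c in columns}
--
--     # Common possibilities, ordered by preference
--     preferred = [
--         "investors", "fund name", "firm name", "organization", "organisation", "company",
--         "investor", "fund", "firm", "name"
--     ]
--     for want in preferred:
--         for c, lc in lower.items():
--             if lc == want:
--                 return c
--
--     # Fuzzy contains search fallbacks
--     contains_order = ["investors", "fund", "firm", "investor", "organization", "company", "name"]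
--     for token in contains_order:
--         for c, lc in lower.items():
--             if token in lc:
--                 return c
--     return None
-- ===== SOURCE B (Python) =====
-- PREFERRED = [
--     "investors", "fund name", "firm name", "organization", "organisation", "company",
--     "investor", "fund", "firm", "name"
-- ]
-- CONTAINS_ORDER = ["investors", "fund", "firm", "investor", "organization", "company", "name"]
--
--
-- def _contains_key(pos: int, lc: str):
--     """Substring-tier key: first CONTAINS_ORDER token contained in lc, or None."""
--     j = next((j for j, t in enumerate(CONTAINS_ORDER) if t in lc), None)
--     return None if j is None else (1, j, pos)
--
--
-- def _score_lc(pos: int, lc: str):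
--     """Ranking key of a normalised name: exact preferred matches beat substring matches."""
--     if lc in PREFERRED:
--         return (0, PREFERRED.index(lc), pos)
--     return _contains_key(pos, lc)
--
--
-- def _score(pos: int, c: str):
--     return _score_lc(pos, str(c).strip().lower())
--
--
-- def _better(best, key, c):
--     """Keep the candidate with the smaller key (earlier position wins ties)."""
--     if key is None:
--         return best
--     if best is None or key < best[0]:
--         return (key, c)
--     return best
--
--
-- def pick_fund_column(columns: list[str]) -> str | None:
--     """Best-effort detection of the fund/firm name column (single-pass argmin)."""
--     best = None  # (key, column)
--     for pos, c in enumerate(columns):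
--         best = _better(best, _score(pos, c), c)
--     return best[1] if best is not None else None
-- ===== Notes on version B (the rewrite author's own statement) =====
-- stated objective: alternative
-- what changed: A dedups columns into a dict and runs two phases of early-returning nested scans (one full pass per preferred name, then per substring token); B scores each column once with a (tier, preference-index, position) ranking key and keeps the lexicographic minimum in a single pass over the columns.
import Mathlib
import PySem

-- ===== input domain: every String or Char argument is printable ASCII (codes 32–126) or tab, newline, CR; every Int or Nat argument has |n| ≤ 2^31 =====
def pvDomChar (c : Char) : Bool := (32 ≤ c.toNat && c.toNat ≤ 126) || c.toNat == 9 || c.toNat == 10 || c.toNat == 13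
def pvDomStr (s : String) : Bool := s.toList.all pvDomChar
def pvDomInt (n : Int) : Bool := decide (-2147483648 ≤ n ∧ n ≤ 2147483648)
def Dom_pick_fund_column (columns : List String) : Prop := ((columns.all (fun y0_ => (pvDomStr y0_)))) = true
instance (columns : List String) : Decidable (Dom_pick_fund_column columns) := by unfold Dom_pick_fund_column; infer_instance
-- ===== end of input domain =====

-- B replaces A's two early-returning nested scans (exact phase, then contains phase, each rescanning
-- a dedup dict of the columns) by one pass that scores every column with a (tier, preference-index,
-- position) key and keeps the minimum; objective: alternative single-pass decomposition.


-- ===== PORT A =====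
-- 'str(c).strip().lower()' and the two constant lists appear verbatim in both sources; shared helpers.
def pvNorm (c : String) : String := PySem.Str.lower (PySem.Str.strip c)
def pvPreferred : List String :=
  ["investors", "fund name", "firm name", "organization", "organisation", "company",
   "investor", "fund", "firm", "name"]
def pvContainsOrder : List String :=
  ["investors", "fund", "firm", "investor", "organization", "company", "name"]

-- inner 'for c, lc in lower.items(): if lc == want: return c'
def pvFindEq (items : List (String × String)) (want : String) : Option String :=
  match items with
  | [] => none
  | (c, lc) :: rest => if lc == want then some c else pvFindEq rest want

-- outer 'for want in preferred: …'
def pvExactLoop (wants : List String) (items : List (String × String)) : Option String :=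
  match wants with
  | [] => none
  | w :: ws =>
    match pvFindEq items w with
    | some c => some c
    | none => pvExactLoop ws items

-- inner 'for c, lc in lower.items(): if token in lc: return c'
def pvFindIn (items : List (String × String)) (token : String) : Option String :=
  match items with
  | [] => none
  | (c, lc) :: rest => if PySem.Str.isIn token lc then some c else pvFindIn rest token

-- outer 'for token in contains_order: …'
def pvContainsLoop (tokens : List String) (items : List (String × String)) : Option String :=
  match tokens with
  | [] => none
  | t :: ts =>
    match pvFindIn items t with
    | some c => some c
    | none => pvContainsLoop ts items

def pick_fund_column (columns : List String) : Option String :=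
  let lower : PySem.Dict String String :=
    columns.foldl (fun d c => d.insert c (pvNorm c)) PySem.Dict.empty
  match pvExactLoop pvPreferred lower.items with
  | some c => some c
  | none => pvContainsLoop pvContainsOrder lower.items

-- ===== PORT B =====
-- Python tuple '<' on (int, int, int), ported by hand (lexicographic; exact for these triples)
def pvKeyLt (a b : Nat × Nat × Int) : Bool :=
  decide (a.1 < b.1 ∨ (a.1 = b.1 ∧ (a.2.1 < b.2.1 ∨ (a.2.1 = b.2.1 ∧ a.2.2 < b.2.2))))

-- B's helper '_contains_key(pos, lc)'
def pvContainsKey (pos : Int) (lc : String) : Option (Nat × Nat × Int) :=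
  match pvContainsOrder.findIdx? (fun t => PySem.Str.isIn t lc) with
  | some j => some (1, j, pos)
  | none => none

-- B's helper '_score_lc(pos, lc)'
def pvScoreLc (pos : Int) (lc : String) : Option (Nat × Nat × Int) :=
  if pvPreferred.contains lc then some (0, (PySem.List.index? pvPreferred lc).getD 0, pos)
  else pvContainsKey pos lc

-- B's helper '_score(pos, c)'
def pvScore (pos : Int) (c : String) : Option (Nat × Nat × Int) :=
  pvScoreLc pos (pvNorm c)

-- B's helper '_better(best, key, c)'
def pvBetter (best : Option ((Nat × Nat × Int) × String)) (key? : Option (Nat × Nat × Int))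
    (c : String) : Option ((Nat × Nat × Int) × String) :=
  match key? with
  | none => best
  | some key =>
    match best with
    | none => some (key, c)
    | some b => if pvKeyLt key b.1 then some (key, c) else best

-- one iteration of B's loop body over 'pos, c = p'
def pvStep (best : Option ((Nat × Nat × Int) × String)) (p : Int × String) :
    Option ((Nat × Nat × Int) × String) :=
  pvBetter best (pvScore p.1 p.2) p.2

def pick_fund_column_alt (columns : List String) : Option String :=
  match (PySem.List.enumerate columns).foldl pvStep none with
  | none => none
  | some b => some b.2

-- ===== PRECONDITION & SPEC =====
def Spec_pick_fund_column (columns : List String) (out : Option String) : Prop := out = pick_fund_column_alt columns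
instance (columns : List String) (out : Option String) : Decidable (Spec_pick_fund_column columns out) := by unfold Spec_pick_fund_column; infer_instance

-- ===== CLAIM (what is proved, stated in full; the proofs are below) =====
def Claim_equal_pick_fund_column : Prop := ∀ (columns : List String), Dom_pick_fund_column columns → Spec_pick_fund_column columns (pick_fund_column columns)

-- ===== LEMMAS AND PROOFS =====

-- exact-phase key: first preferred name equal to the normalised column, if any
def pvKE (c : String) : Option Nat := pvPreferred.findIdx? (fun w => pvNorm c == w)
-- contains-phase key: first token contained in the normalised column, if any
def pvKC (c : String) : Option Nat := pvContainsOrder.findIdx? (fun t => PySem.Str.isIn t (pvNorm c))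
-- combined key: exact matches (0–9) beat contains matches (10–16)
def pvK (c : String) : Option Nat :=
  match pvKE c with
  | some i => some i
  | none => (pvKC c).map (· + 10)

-- reference argmin: first element with the minimal key, ties to the earlier element
def pvBest (k : String → Option Nat) : List String → Option String
  | [] => none
  | c :: cs =>
    match k c, pvBest k cs with
    | none, r => r
    | some _, none => some c
    | some i, some c' =>
      match k c' with
      | none => some c
      | some j => if i ≤ j then some c else some c'

-- generic form of A's two phases: first element matching the earliest want
def pvScan (p : String → String → Bool) : List String → List String → Option String
  | [], _ => none
  | w :: ws, xs =>
    match xs.find? (p w) with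
    | some c => some c
    | none => pvScan p ws xs

theorem pvBest_key (k : String → Option Nat) (xs : List String) (c : String)
    (h : pvBest k xs = some c) : c ∈ xs ∧ ∃ i, k c = some i := by
  induction xs with
  | nil => simp [pvBest] at h
  | cons x cs ih =>
    simp only [pvBest] at h
    cases hk : k x with
    | none =>
      simp only [hk] at h
      rcases ih h with ⟨h1, h2⟩
      exact ⟨List.mem_cons_of_mem _ h1, h2⟩
    | some i =>
      cases hb : pvBest k cs with
      | none => simp only [hk, hb] at h; simp at h; subst h; exact ⟨List.mem_cons_self .., i, hk⟩
      | some d =>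
        cases hd : k d with
        | none => simp only [hk, hb, hd] at h; simp at h; subst h; exact ⟨List.mem_cons_self .., i, hk⟩
        | some j =>
          simp only [hk, hb, hd] at h
          by_cases hij : i ≤ j
          · simp [hij] at h; subst h; exact ⟨List.mem_cons_self .., i, hk⟩
          · simp [hij] at h; subst h
            rcases ih hb with ⟨h1, _⟩
            exact ⟨List.mem_cons_of_mem _ h1, j, hd⟩

theorem pvBest_none (k : String → Option Nat) (xs : List String)
    (h : pvBest k xs = none) : ∀ c ∈ xs, k c = none := by
  induction xs with
  | nil => intro c hc; simp at hc
  | cons x cs ih =>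
    simp only [pvBest] at h
    cases hk : k x with
    | none =>
      simp only [hk] at h
      intro c hc
      rcases List.mem_cons.mp hc with rfl | hc
      · exact hk
      · exact ih h c hc
    | some i =>
      cases hb : pvBest k cs with
      | none => simp only [hk, hb] at h; simp at h
      | some d =>
        cases hd : k d with
        | none => simp only [hk, hb, hd] at h; simp at h
        | some j => simp only [hk, hb, hd] at h; by_cases hij : i ≤ j <;> simp [hij] at h

theorem pvBest_congr (k k' : String → Option Nat) (xs : List String)
    (h : ∀ c ∈ xs, k c = k' c) : pvBest k xs = pvBest k' xs := by
  induction xs with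
  | nil => rfl
  | cons x cs ih =>
    have hx := h x (List.mem_cons_self ..)
    have ih' := ih (fun c hc => h c (List.mem_cons_of_mem _ hc))
    simp only [pvBest, hx, ih']
    cases hk : k' x with
    | none => rfl
    | some i =>
      cases hb : pvBest k' cs with
      | none => simp [hk, hb]
      | some d =>
        have hd := h d (List.mem_cons_of_mem _ (pvBest_key k' cs d hb).1)
        simp only [hk, hb, hd]

theorem pvBest_map_add (k : String → Option Nat) (n : Nat) (xs : List String) :
    pvBest (fun c => (k c).map (· + n)) xs = pvBest k xs := by
  induction xs with
  | nil => rfl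
  | cons x cs ih =>
    simp only [pvBest, ih]
    cases hk : k x with
    | none => simp
    | some i =>
      simp only [Option.map_some]
      cases hb : pvBest k cs with
      | none => rfl
      | some d =>
        rcases (pvBest_key k cs d hb).2 with ⟨j, hd⟩
        simp only [hd, Option.map_some]
        by_cases hij : i ≤ j
        · simp [hij]
        · simp [hij, Nat.add_le_add_iff_right]

theorem pvScan_eq_best (p : String → String → Bool) (ws xs : List String) :
    pvScan p ws xs = pvBest (fun c => ws.findIdx? (fun w => p w c)) xs := by
  induction ws generalizing xs with
  | nil =>
    induction xs with
    | nil => rfl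
    | cons c cs ih => simpa [pvBest, pvScan] using ih
  | cons w ws ihw =>
    induction xs with
    | nil =>
      simp only [pvScan, List.find?_nil]
      rw [ihw]
      rfl
    | cons c cs ihx =>
      simp only [pvScan, List.find?_cons]
      cases hpw : p w c with
      | true =>
        have hkc : (w :: ws).findIdx? (fun w' => p w' c) = some 0 := by
          simp [List.findIdx?_cons, hpw]
        cases hb : pvBest (fun c => (w :: ws).findIdx? (fun w' => p w' c)) cs with
        | none => simp [pvBest, hkc, hb, hpw]
        | some d =>
          rcases (pvBest_key _ _ _ hb).2 with ⟨j, hd⟩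
          simp only [pvBest, hkc, hb, hd, hpw]
          simp
      | false =>
        have hkc : (w :: ws).findIdx? (fun w' => p w' c)
            = (ws.findIdx? (fun w' => p w' c)).map (· + 1) := by
          simp [List.findIdx?_cons, hpw]
        cases hf : cs.find? (p w) with
        | some d =>
          have hpd : p w d = true := List.find?_some hf
          have hbd : pvBest (fun c => (w :: ws).findIdx? (fun w' => p w' c)) cs = some d := by
            rw [← ihx]
            simp only [pvScan, hf]
          have hkd : (w :: ws).findIdx? (fun w' => p w' d) = some 0 := by
            simp [List.findIdx?_cons, hpd]
          simp only [pvBest, hkc, hbd]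
          cases hm : ws.findIdx? (fun w' => p w' c) with
          | none => simp
          | some m => simp [hkd]
        | none =>
          have hnone : ∀ x ∈ cs, p w x = false := by
            intro x hx
            simpa using List.find?_eq_none.mp hf x hx
          have hch : pvBest (fun c => (w :: ws).findIdx? (fun w' => p w' c)) cs
              = pvBest (fun c => ws.findIdx? (fun w' => p w' c)) cs := by
            rw [pvBest_congr (fun c => (w :: ws).findIdx? (fun w' => p w' c))
                 (fun c => (ws.findIdx? (fun w' => p w' c)).map (· + 1)) cs ?_]
            · exact pvBest_map_add _ 1 cs
            · intro d hd
              simp [List.findIdx?_cons, hnone d hd]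
          simp only [hpw, hf]
          rw [ihw]
          simp only [pvBest, hkc, hch]
          cases hm : ws.findIdx? (fun w' => p w' c) with
          | none => simp
          | some m =>
            simp only [Option.map_some]
            cases hb2 : pvBest (fun c => ws.findIdx? (fun w' => p w' c)) cs with
            | none => simp
            | some d' =>
              rcases pvBest_key _ _ _ hb2 with ⟨hmem, j, hj⟩
              have hkd' : (w :: ws).findIdx? (fun w' => p w' d') = some (j + 1) := by
                simp [List.findIdx?_cons, hnone d' hmem, hj]
              simp only [hj, hkd']
              by_cases hmj : m ≤ j
              · simp [hmj]
              · simp [hmj, Nat.add_le_add_iff_right]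

theorem pvFindEq_map (xs : List String) (w : String) :
    pvFindEq (xs.map (fun c => (c, pvNorm c))) w = xs.find? (fun c => pvNorm c == w) := by
  induction xs with
  | nil => rfl
  | cons x cs ih =>
    simp only [List.map_cons, pvFindEq, List.find?_cons]
    cases h : (pvNorm x == w) <;> simp [h, ih]

theorem pvFindIn_map (xs : List String) (t : String) :
    pvFindIn (xs.map (fun c => (c, pvNorm c))) t = xs.find? (fun c => PySem.Str.isIn t (pvNorm c)) := by
  induction xs with
  | nil => rfl
  | cons x cs ih =>
    simp only [List.map_cons, pvFindIn, List.find?_cons]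
    cases h : PySem.Str.isIn t (pvNorm x) <;> simp [h, ih]

theorem pvExactLoop_map (ws xs : List String) :
    pvExactLoop ws (xs.map (fun c => (c, pvNorm c))) = pvScan (fun w c => pvNorm c == w) ws xs := by
  induction ws with
  | nil => rfl
  | cons w ws ih =>
    simp only [pvExactLoop, pvScan, pvFindEq_map]
    cases xs.find? (fun c => pvNorm c == w) <;> simp [ih]

theorem pvContainsLoop_map (ts xs : List String) :
    pvContainsLoop ts (xs.map (fun c => (c, pvNorm c))) = pvScan (fun t c => PySem.Str.isIn t (pvNorm c)) ts xs := by
  induction ts with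
  | nil => rfl
  | cons t ts ih =>
    simp only [pvContainsLoop, pvScan, pvFindIn_map]
    cases xs.find? (fun c => PySem.Str.isIn t (pvNorm c)) <;> simp [ih]

theorem pvDict_items (columns : List String) :
    (columns.foldl (fun d c => d.insert c (pvNorm c)) PySem.Dict.empty).items
      = (PySem.Set.ofList columns).map (fun c => (c, pvNorm c)) := by
  induction columns using List.reverseRecOn with
  | nil => rfl
  | append_singleton xs x ih =>
    rw [List.foldl_append, PySem.Set.ofList_append_singleton]
    simp only [List.foldl_cons, List.foldl_nil]
    have hkeys : (xs.foldl (fun d c => d.insert c (pvNorm c)) PySem.Dict.empty).keys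
        = PySem.Set.ofList xs := by
      show ((xs.foldl (fun d c => d.insert c (pvNorm c)) PySem.Dict.empty).items.map Prod.fst)
          = PySem.Set.ofList xs
      rw [ih, List.map_map]
      show (PySem.Set.ofList xs).map (fun a => a) = PySem.Set.ofList xs
      simp
    by_cases hx : x ∈ PySem.Set.ofList xs
    · have hcont : (xs.foldl (fun d c => d.insert c (pvNorm c)) PySem.Dict.empty).contains x = true := by
        rw [PySem.Dict.contains_eq_decide_mem_keys, hkeys]
        simpa using hx
      rw [PySem.Dict.items_insert_of_contains _ _ hcont, ih, PySem.Set.add_of_mem hx]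
      rw [List.map_map]
      apply List.map_congr_left
      intro a _
      by_cases hax : a = x
      · subst hax; simp
      · simp [hax]
    · have hcont : (xs.foldl (fun d c => d.insert c (pvNorm c)) PySem.Dict.empty).contains x = false := by
        rw [PySem.Dict.contains_eq_decide_mem_keys, hkeys]
        simpa using hx
      rw [PySem.Dict.items_insert_of_not_contains _ _ hcont, ih, PySem.Set.add_of_not_mem hx]
      simp

theorem pvFind_ofList (q : String → Bool) (xs : List String) :
    (PySem.Set.ofList xs).find? q = xs.find? q := by
  induction xs using List.reverseRecOn with
  | nil => rfl
  | append_singleton xs x ih =>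
    rw [PySem.Set.ofList_append_singleton]
    by_cases hx : x ∈ PySem.Set.ofList xs
    · rw [PySem.Set.add_of_mem hx]
      rw [ih]
      cases hf : xs.find? q with
      | some d => simp [List.find?_append, hf]
      | none =>
        have hqx : q x = false := by
          have hmem : x ∈ xs := by simpa [PySem.Set.mem_ofList] using hx
          have := List.find?_eq_none.mp hf x hmem
          simpa using this
        simp [List.find?_append, hf, hqx]
    · rw [PySem.Set.add_of_not_mem hx]
      simp [List.find?_append, ih]

theorem pvScan_ofList (p : String → String → Bool) (ws xs : List String) :
    pvScan p ws (PySem.Set.ofList xs) = pvScan p ws xs := by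
  induction ws with
  | nil => rfl
  | cons w ws ih =>
    simp only [pvScan, pvFind_ofList]
    cases xs.find? (p w) <;> simp [ih]

theorem pvKE_lt (c : String) (i : Nat) (h : pvKE c = some i) : i < 10 := by
  have hlen := (List.findIdx?_eq_some_iff_findIdx_eq.mp h).1
  simpa [pvPreferred] using hlen

set_option maxHeartbeats 1000000 in
theorem pvPhases (xs : List String) :
    (match pvBest pvKE xs with
     | some c => some c
     | none => pvBest pvKC xs) = pvBest pvK xs := by
  induction xs with
  | nil =>
    have h1 : pvBest pvKE ([] : List String) = none := rfl
    have h2 : pvBest pvKC ([] : List String) = none := rfl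
    have h3 : pvBest pvK ([] : List String) = none := rfl
    rw [h1, h3]
    simpa using h2
  | cons c cs ih =>
    cases hE : pvKE c with
    | some i =>
      have hKc : pvK c = some i := by simp [pvK, hE]
      cases hbe : pvBest pvKE cs with
      | some c' =>
        have hbK : pvBest pvK cs = some c' := by rw [← ih, hbe]
        rcases (pvBest_key _ _ _ hbe).2 with ⟨i', hE'⟩
        have hKc' : pvK c' = some i' := by simp [pvK, hE']
        simp only [pvBest, hE, hbe, hKc, hbK, hKc', hE']
        by_cases hii : i ≤ i' <;> simp [hii]
      | none =>
        have hbK : pvBest pvK cs = pvBest pvKC cs := by rw [← ih, hbe]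
        cases hbc : pvBest pvKC cs with
        | none =>
          simp only [pvBest, hE, hbe, hKc, hbK, hbc]
        | some d =>
          have hEd : pvKE d = none := pvBest_none pvKE cs hbe d (pvBest_key _ _ _ hbc).1
          rcases (pvBest_key _ _ _ hbc).2 with ⟨j, hCd⟩
          have hKd : pvK d = some (j + 10) := by simp [pvK, hEd, hCd]
          have hile : i ≤ j + 10 := by have := pvKE_lt c i hE; omega
          simp only [pvBest, hE, hbe, hKc, hbK, hbc, hKd]
          simp [hile]
    | none =>
      have hKc : pvK c = (pvKC c).map (· + 10) := by simp [pvK, hE]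
      cases hbe : pvBest pvKE cs with
      | some c' =>
        have hbK : pvBest pvK cs = some c' := by rw [← ih, hbe]
        rcases (pvBest_key _ _ _ hbe).2 with ⟨i', hE'⟩
        have hi' : i' < 10 := pvKE_lt c' i' hE'
        have hKc' : pvK c' = some i' := by simp [pvK, hE']
        cases hC : pvKC c with
        | none =>
          simp only [pvBest, hE, hbe, hKc, hC, Option.map_none, hbK]
        | some j =>
          have hnle : ¬ (j + 10 ≤ i') := by omega
          simp only [pvBest, hE, hbe, hKc, hC, Option.map_some, hbK, hKc']
          simp [hnle]
      | none =>
        have hbK : pvBest pvK cs = pvBest pvKC cs := by rw [← ih, hbe]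
        simp only [pvBest, hE, hbe, hKc, hbK]
        cases hC : pvKC c with
        | none => simp
        | some j =>
          simp only [Option.map_some]
          cases hbc : pvBest pvKC cs with
          | none => simp
          | some d =>
            have hEd : pvKE d = none := pvBest_none pvKE cs hbe d (pvBest_key _ _ _ hbc).1
            rcases (pvBest_key _ _ _ hbc).2 with ⟨j', hCd⟩
            have hKd : pvK d = some (j' + 10) := by simp [pvK, hEd, hCd]
            simp only [hCd, hKd]
            by_cases hjj : j ≤ j' <;> simp [hjj, Nat.add_le_add_iff_right]

-- decode a combined key back into B's (tier, index) pair
def pvDec (k : Nat) : Nat × Nat := if k < 10 then (0, k) else (1, k - 10)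

def pvEnc (t i : Nat) : Nat := if t = 0 then i else i + 10

-- merging a partial accumulator with the best of the remaining columns
def pvMerge (acc : Option ((Nat × Nat × Int) × String)) (r : Option String) : Option String :=
  match acc, r with
  | none, r => r
  | some a, none => some a.2
  | some a, some c' => if pvEnc a.1.1 a.1.2.1 ≤ (pvK c').getD 0 then some a.2 else some c'

-- accumulator invariant: stored position is before s, stored key is a valid encoded key
def pvInv (acc : Option ((Nat × Nat × Int) × String)) (s : Int) : Prop :=
  ∀ kk c, acc = some (kk, c) → kk.2.2 < s ∧ (kk.1 = 0 ∧ kk.2.1 < 10 ∨ kk.1 = 1)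

theorem pvScore_eq (s : Int) (c : String) :
    pvScore s c = (pvK c).map (fun k => ((pvDec k).1, (pvDec k).2, s)) := by
  have hfun : (fun w => pvNorm c == w) = (fun w => w == pvNorm c) := by
    funext w
    by_cases h : pvNorm c = w
    · subst h; rfl
    · have h1 : (pvNorm c == w) = false := beq_eq_false_iff_ne.mpr h
      have h2 : (w == pvNorm c) = false := beq_eq_false_iff_ne.mpr (Ne.symm h)
      rw [h1, h2]
  have hidx : PySem.List.index? pvPreferred (pvNorm c) = pvKE c := by
    rw [PySem.List.index?_eq_idxOf?]
    show pvPreferred.findIdx? (fun w => w == pvNorm c) = pvPreferred.findIdx? (fun w => pvNorm c == w)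
    rw [hfun]
  show pvScoreLc s (pvNorm c) = _
  by_cases hc : pvPreferred.contains (pvNorm c) = true
  · have hmem : pvNorm c ∈ pvPreferred := by simpa using hc
    have hsome : (pvKE c).isSome := by
      rw [← hidx]
      exact (PySem.List.index?_isSome_iff _ _).mpr hmem
    obtain ⟨i, hi⟩ := Option.isSome_iff_exists.mp hsome
    have hilt : i < 10 := pvKE_lt c i hi
    have hKc : pvK c = some i := by simp [pvK, hi]
    have hgi : PySem.List.index? pvPreferred (pvNorm c) = some i := by rw [hidx, hi]
    have h1 : pvScoreLc s (pvNorm c)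
        = some ((0 : Nat), (PySem.List.index? pvPreferred (pvNorm c)).getD 0, s) := if_pos hc
    rw [h1, hgi, hKc]
    simp [pvDec, hilt]
  · have hE : pvKE c = none := by
      rw [← hidx]
      exact (PySem.List.index?_eq_none_iff _ _).mpr (by simpa using hc)
    have h2 : pvScoreLc s (pvNorm c) = pvContainsKey s (pvNorm c) := if_neg hc
    rw [h2]
    cases hC : pvContainsOrder.findIdx? (fun t => PySem.Str.isIn t (pvNorm c)) with
    | none =>
      have hC' : pvKC c = none := hC
      have h3 : pvContainsKey s (pvNorm c) = none := by
        unfold pvContainsKey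
        rw [hC]
      rw [h3]
      simp [pvK, hE, hC']
    | some j =>
      have hC' : pvKC c = some j := hC
      have hnl : ¬ (j + 10 < 10) := by omega
      have h3 : pvContainsKey s (pvNorm c) = some (1, j, s) := by
        unfold pvContainsKey
        rw [hC]
      rw [h3]
      simp [pvK, hE, hC', pvDec, hnl]

theorem pvStep_eq (acc : Option ((Nat × Nat × Int) × String)) (s : Int) (c : String) :
    pvStep acc (s, c) =
      match pvK c with
      | none => acc
      | some k =>
        match acc with
        | none => some (((pvDec k).1, (pvDec k).2, s), c)
        | some b =>
          if pvKeyLt ((pvDec k).1, (pvDec k).2, s) b.1 then some (((pvDec k).1, (pvDec k).2, s), c) else some b := by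
  show pvBetter acc (pvScore s c) c = _
  rw [pvScore_eq]
  cases pvK c with
  | none => cases acc <;> rfl
  | some k => cases acc <;> rfl

theorem pvKeyLt_enc (t i t' i' : Nat) (s p : Int) (hp : p < s)
    (h0 : t = 0 → i < 10) (h0' : t' = 0 → i' < 10) (ht : t ≤ 1) (ht' : t' ≤ 1) :
    pvKeyLt (t, i, s) (t', i', p) = decide (pvEnc t i < pvEnc t' i') := by
  unfold pvKeyLt pvEnc
  dsimp only
  rw [decide_eq_decide]
  split_ifs with h1 h2 h2 <;> omega

set_option maxHeartbeats 1000000 in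
theorem pvFoldB (cs : List String) (acc : Option ((Nat × Nat × Int) × String)) (s : Int)
    (hinv : pvInv acc s) :
    (match (PySem.List.enumerate cs s).foldl pvStep acc with
     | none => none
     | some b => some b.2) = pvMerge acc (pvBest pvK cs) := by
  induction cs generalizing acc s with
  | nil =>
    cases acc with
    | none => rfl
    | some a => rfl
  | cons c cs ih =>
    rw [PySem.List.enumerate_cons, List.foldl_cons]
    have hstep := pvStep_eq acc s c
    cases hK : pvK c with
    | none =>
      rw [hK] at hstep
      rw [hstep, ih acc (s + 1) (by intro kk cc hcc; rcases hinv kk cc hcc with ⟨h1, h2⟩; exact ⟨by omega, h2⟩)]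
      simp only [pvBest, hK]
    | some k =>
      rw [hK] at hstep
      have hencdec : pvEnc (pvDec k).1 (pvDec k).2 = k := by
        unfold pvDec pvEnc
        split_ifs with h1 h2 <;> simp_all
      have hdecinv : (pvDec k).1 = 0 ∧ (pvDec k).2 < 10 ∨ (pvDec k).1 = 1 := by
        unfold pvDec
        split_ifs with h1 <;> simp [h1]
      cases acc with
      | none =>
        simp only at hstep
        rw [hstep, ih _ (s + 1) (by
          intro kk cc hcc
          injection hcc with h'
          injection h' with h1 h2
          subst h1
          refine ⟨by dsimp only; omega, ?_⟩
          simpa using hdecinv)]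
        cases hb : pvBest pvK cs with
        | none => simp [pvMerge, pvBest, hK, hb]
        | some d =>
          rcases (pvBest_key _ _ _ hb).2 with ⟨j, hj⟩
          simp only [pvMerge, pvBest, hK, hb, hj, hencdec]
          by_cases hkj : k ≤ j <;> simp [hkj, pvMerge, hj, hencdec]
      | some b =>
        obtain ⟨⟨t', i', p⟩, bc⟩ := b
        rcases hinv (t', i', p) bc rfl with ⟨hp0, htier⟩
        have hp : p < s := by simpa using hp0
        have hcomp : pvKeyLt ((pvDec k).1, (pvDec k).2, s) (t', i', p) = decide (k < pvEnc t' i') := by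
          rw [pvKeyLt_enc _ _ _ _ _ _ hp
            (by rcases hdecinv with ⟨h1, h2⟩ | h1 <;> simp_all)
            (by rcases htier with ⟨h1, h2⟩ | h1 <;> simp_all)
            (by rcases hdecinv with ⟨h1, _⟩ | h1 <;> omega)
            (by rcases htier with ⟨h1, _⟩ | h1 <;> omega), hencdec]
        simp only at hstep
        rw [hcomp] at hstep
        by_cases hlt : k < pvEnc t' i'
        · simp only [hlt, decide_true, if_true] at hstep
          rw [hstep, ih _ (s + 1) (by
            intro kk cc hcc
            injection hcc with h'
            injection h' with h1 h2
            subst h1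
            refine ⟨by dsimp only; omega, ?_⟩
            simpa using hdecinv)]
          cases hb : pvBest pvK cs with
          | none =>
            have : ¬ (pvEnc t' i' ≤ k) := by omega
            simp [pvMerge, pvBest, hK, hb, hencdec, this]
          | some d =>
            rcases (pvBest_key _ _ _ hb).2 with ⟨j, hj⟩
            simp only [pvMerge, pvBest, hK, hb, hj, hencdec]
            by_cases hkj : k ≤ j
            · have h1 : ¬ (pvEnc t' i' ≤ k) := by omega
              simp [hkj, pvMerge, hj, hencdec, h1, hK]
            · have h1 : ¬ (pvEnc t' i' ≤ j) := by omega
              simp [hkj, pvMerge, hj, hencdec, h1, hK]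
        · simp only [hlt, decide_false] at hstep
          rw [hstep, ih _ (s + 1) (by
            intro kk cc hcc
            injection hcc with h'
            injection h' with h1 h2
            subst h1
            exact ⟨by dsimp only; omega, htier⟩)]
          have hge : pvEnc t' i' ≤ k := by omega
          cases hb : pvBest pvK cs with
          | none => simp [pvMerge, pvBest, hK, hb, hge]
          | some d =>
            rcases (pvBest_key _ _ _ hb).2 with ⟨j, hj⟩
            simp only [pvMerge, pvBest, hK, hb, hj]
            by_cases hkj : k ≤ j
            · have h1 : pvEnc t' i' ≤ j := by omega
              have h2 : ¬ ((pvK c).getD 0 < pvEnc t' i') := by simp [hK]; omega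
              simp [hkj, hj, hge, h1, hK, h2]
            · simp [hkj, pvMerge, hj]

set_option maxHeartbeats 1000000 in
theorem pickA_eq_best (columns : List String) :
    pick_fund_column columns = pvBest pvK columns := by
  show (match pvExactLoop pvPreferred
          (columns.foldl (fun d c => d.insert c (pvNorm c)) PySem.Dict.empty).items with
        | some c => some c
        | none =>
          pvContainsLoop pvContainsOrder
            (columns.foldl (fun d c => d.insert c (pvNorm c)) PySem.Dict.empty).items)
      = pvBest pvK columns
  rw [pvDict_items, pvExactLoop_map, pvContainsLoop_map, pvScan_ofList, pvScan_ofList,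
    pvScan_eq_best, pvScan_eq_best]
  exact pvPhases columns

set_option maxHeartbeats 1000000 in
theorem pickB_eq_best (columns : List String) :
    pick_fund_column_alt columns = pvBest pvK columns := by
  unfold pick_fund_column_alt
  rw [pvFoldB columns none 0 (by intro kk cc hcc; cases hcc)]
  rfl

-- ===== VERDICT (by name: the statement is the Claim_ definition above) =====
theorem pick_fund_column_spec : Claim_equal_pick_fund_column := by
  intro columns _
  unfold Spec_pick_fund_column
  rw [pickA_eq_best, pickB_eq_best]
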